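-- pv_equiv track=rewrite | github.com/rsumner33/urh | src/urh/signalprocessing/encoding.py | code_differential
-- ===== SOURCE A (Python) =====
-- def code_differential(decoding, inpt):
--     output = [inpt[0]]
--     errors = 0
--
--     if decoding:
--         # Remove differential from inpt stream
--         i = 1
--         while i < len(inpt):
--             if inpt[i] != inpt[i - 1]:
--                 output.append(True)
--             else:
--                 output.append(False)
--             i += 1
--     else:
--         # Add differential encoding to output stream
--         i = 1
--         while i < len(inpt):
--             if not inpt[i]:
--                 output.append(output[i - 1])
--             else:
--                 if not output[i - 1]:
--                     output.append(True)
--                 else: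
--                     output.append(False)
--             i += 1
--     return output, errors
-- ===== SOURCE B (Python) =====
-- def code_differential(decoding, inpt):
--     if decoding:
--         # random-access closed form: bit 0 is inpt[0], bit i marks a change at i
--         output = [inpt[i] if i == 0 else inpt[i] != inpt[i - 1] for i in range(len(inpt))]
--     else:
--         # staged: pass 1 builds integer prefix counts of True bits, pass 2 maps
--         # each count to its parity (bit i = parity of True bits in inpt[:i+1])
--         total = 0
--         counts = []
--         for x in inpt:
--             total += x
--             counts.append(total)
--         output = [c % 2 == 1 for c in counts]
--     return output, 0
-- ===== Notes on version B (the rewrite author's own statement) =====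
-- stated objective: alternative
-- what changed: Encoding no longer uses A's recurrence that reads previous output bits back: B computes bit i as the parity of the number of True bits in inpt[:i+1], in two staged passes (an integer prefix-count pass, then a parity map); decoding becomes a random-access index comprehension instead of the while loop with appends.
-- outside the precondition, e.g. on code_differential(False, []): A raises IndexError, B returns ([], 0)
import Mathlib
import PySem

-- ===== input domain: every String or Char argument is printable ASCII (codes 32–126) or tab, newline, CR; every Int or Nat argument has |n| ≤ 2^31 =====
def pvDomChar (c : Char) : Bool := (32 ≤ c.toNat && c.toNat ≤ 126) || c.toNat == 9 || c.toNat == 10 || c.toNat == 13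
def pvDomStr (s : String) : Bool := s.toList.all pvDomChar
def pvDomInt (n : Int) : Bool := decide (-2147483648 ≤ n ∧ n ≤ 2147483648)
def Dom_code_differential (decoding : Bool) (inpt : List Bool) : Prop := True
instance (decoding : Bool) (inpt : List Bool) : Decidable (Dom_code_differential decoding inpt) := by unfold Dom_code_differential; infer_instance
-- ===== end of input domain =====

-- B replaces A's index-driven while loops (which read back into the output list) by two
-- staged passes for encoding (integer prefix counts of True bits, then a parity map) and a
-- random-access index comprehension for decoding (objective: alternative, same cost).

-- ===== PORT A =====
-- literal transliteration of A: output seeded with inpt[0] (pyGetD default is unreachable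
-- under Pre_, which excludes the empty list where Python raises IndexError), then a
-- while-loop over i = 1 .. len(inpt)-1 appending to output, reading output[i-1] back.
def code_differential (decoding : Bool) (inpt : List Bool) : List Bool × Int :=
  let output : List Bool := [PySem.List.pyGetD inpt 0 false]
  let errors : Int := 0
  if decoding then
    let output := (PySem.List.pyRange 1 (PySem.List.len inpt) 1).foldl
      (fun output i =>
        if PySem.List.pyGetD inpt i false ≠ PySem.List.pyGetD inpt (i - 1) false
        then output ++ [true]
        else output ++ [false]) output
    (output, errors)
  else
    let output := (PySem.List.pyRange 1 (PySem.List.len inpt) 1).foldl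
      (fun output i =>
        if !(PySem.List.pyGetD inpt i false) then
          output ++ [PySem.List.pyGetD output (i - 1) false]
        else if !(PySem.List.pyGetD output (i - 1) false) then
          output ++ [true]
        else
          output ++ [false]) output
    (output, errors)

-- ===== PORT B =====
-- literal transliteration of Source B: decoding is the comprehension
-- [inpt[i] if i == 0 else inpt[i] != inpt[i-1] for i in range(len(inpt))];
-- encoding is a counting loop over inpt accumulating (total, counts) followed by the
-- parity map [c % 2 == 1 for c in counts].  On the empty list B returns ([], 0) in
-- Python too (outside Pre_, where A raises).
def code_differential_alt (decoding : Bool) (inpt : List Bool) : List Bool × Int :=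
  if decoding then
    ((PySem.List.pyRange 0 (PySem.List.len inpt) 1).map
      (fun i => if i = 0 then PySem.List.pyGetD inpt 0 false
                else decide (PySem.List.pyGetD inpt i false ≠ PySem.List.pyGetD inpt (i - 1) false)),
     0)
  else
    let s := inpt.foldl
      (fun (s : Int × List Int) x =>
        (s.1 + (if x then 1 else 0), s.2 ++ [s.1 + (if x then 1 else 0)]))
      (0, [])
    (s.2.map (fun c => decide (c % 2 = 1)), 0)

-- ===== PRECONDITION & SPEC =====
-- A evaluates inpt[0] first and raises IndexError on the empty list; Pre_ excludes exactly that.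
def Pre_code_differential (decoding : Bool) (inpt : List Bool) : Prop := inpt ≠ []
instance (decoding : Bool) (inpt : List Bool) : Decidable (Pre_code_differential decoding inpt) := by unfold Pre_code_differential; infer_instance
def pvWitness_code_differential : Bool × List Bool := (true, [true, false, true])

def Spec_code_differential (decoding : Bool) (inpt : List Bool) (out : List Bool × Int) : Prop := out = code_differential_alt decoding inpt
instance (decoding : Bool) (inpt : List Bool) (out : List Bool × Int) : Decidable (Spec_code_differential decoding inpt out) := by unfold Spec_code_differential; infer_instance

-- ===== CLAIM (what is proved, stated in full; the proofs are below) =====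
def Claim_equal_code_differential : Prop := ∀ (decoding : Bool) (inpt : List Bool), Dom_code_differential decoding inpt → Pre_code_differential decoding inpt → Spec_code_differential decoding inpt (code_differential decoding inpt)

-- ===== LEMMAS AND PROOFS =====

-- last entry of a prefix scan is the fold of the whole list
theorem scanl_getD_length {α : Type} (f : α → Bool → α) (b : α) (l : List Bool) (d : α) :
    (List.scanl f b l).getD l.length d = List.foldl f b l := by
  induction l generalizing b with
  | nil => rfl
  | cons x l ih => simpa [List.scanl] using ih (f b x)

-- a prefix scan extended by one element
theorem scanl_concat {α : Type} (f : α → Bool → α) (b : α) (l : List Bool) (a : Bool) :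
    List.scanl f b (l ++ [a]) = List.scanl f b l ++ [f (List.foldl f b l) a] := by
  induction l generalizing b with
  | nil => rfl
  | cons x l ih =>
    rw [List.cons_append, List.scanl_cons, ih (f b x), List.scanl_cons]
    simp

-- A's encoding loop invariant: after processing indices 1..m the output is the flip-scan of take m
theorem enc_loop (h : Bool) (t : List Bool) :
    ∀ m : Nat, m ≤ t.length →
    (PySem.List.pyRange 1 ((m : Int) + 1) 1).foldl
      (fun output i =>
        if !(PySem.List.pyGetD (h :: t) i false) then
          output ++ [PySem.List.pyGetD output (i - 1) false]
        else if !(PySem.List.pyGetD output (i - 1) false) then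
          output ++ [true]
        else
          output ++ [false]) [h]
      = List.scanl (fun acc x => if x then !acc else acc) h (t.take m) := by
  intro m
  induction m with
  | zero => intro _; simp [PySem.List.pyRange_one_eq_nil]
  | succ m ih =>
    intro hm
    have hm' : m ≤ t.length := Nat.le_of_succ_le hm
    have hmlt : m < t.length := hm
    have hrange : PySem.List.pyRange 1 ((↑(m + 1) : Int) + 1) 1
        = PySem.List.pyRange 1 ((m : Int) + 1) 1 ++ [(m : Int) + 1] := by
      have : ((↑(m + 1) : Int) + 1) = ((m : Int) + 1) + 1 := by push_cast; ring
      rw [this, PySem.List.pyRange_one_succ_right (by omega)]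
    rw [hrange, List.foldl_append, ih hm']
    have htake : t.take (m + 1) = t.take m ++ [t[m]] := by
      rw [List.take_add_one]; simp [List.getElem?_eq_getElem hmlt]
    rw [htake, scanl_concat]
    have hin : PySem.List.pyGetD (h :: t) ((m : Int) + 1) false = t[m] := by
      have : ((m : Int) + 1) = ((m + 1 : Nat) : Int) := by push_cast; ring
      rw [this, PySem.List.pyGetD_natCast]
      simp [List.getD, List.getElem?_eq_getElem hmlt]
    have hlast : PySem.List.pyGetD (List.scanl (fun acc x => if x then !acc else acc) h (t.take m)) ((m : Int) + 1 - 1) false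
        = List.foldl (fun acc x => if x then !acc else acc) h (t.take m) := by
      have he : ((m : Int) + 1 - 1) = ((m : Nat) : Int) := by ring
      rw [he, PySem.List.pyGetD_natCast]
      have := scanl_getD_length (fun acc x => if x then !acc else acc) h (t.take m) false
      rwa [List.length_take, Nat.min_eq_left hm'] at this
    simp only [List.foldl_cons, List.foldl_nil]
    rw [hin, hlast]
    cases t[m] <;> cases List.foldl (fun acc x => if x then !acc else acc) h (t.take m) <;> simp

-- a scan is its seed consed onto its tail
theorem scanl_eq_cons_tail {α β : Type} (f : α → β → α) (b : α) (l : List β) :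
    List.scanl f b l = b :: (List.scanl f b l).tail := by
  cases l <;> simp [List.scanl]

-- B's counting loop produces the tail of the integer prefix-count scan
theorem counts_fold (l : List Bool) :
    ∀ (a : Int) (cs : List Int),
    (l.foldl (fun (s : Int × List Int) x =>
        (s.1 + (if x then 1 else 0), s.2 ++ [s.1 + (if x then 1 else 0)])) (a, cs)).2
      = cs ++ (List.scanl (fun c x => c + (if x then 1 else 0)) a l).tail := by
  induction l with
  | nil => intro a cs; simp [List.scanl]
  | cons x l ih =>
    intro a cs
    simp only [List.foldl_cons, List.scanl_cons, List.tail_cons, ih]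
    simp only [List.append_assoc, List.singleton_append]
    rw [← scanl_eq_cons_tail]

-- parity of the prefix counts is exactly the running-flip scan
theorem parity_scanl (l : List Bool) :
    ∀ (a : Int),
    (List.scanl (fun c x => c + (if x then 1 else 0)) a l).map (fun c => decide (c % 2 = 1))
      = List.scanl (fun p x => if x then !p else p) (decide (a % 2 = 1)) l := by
  induction l with
  | nil => intro a; rfl
  | cons x l ih =>
    intro a
    rw [List.scanl_cons, List.scanl_cons, List.map_cons, ih]
    have hstep : decide ((a + (if x then 1 else 0)) % 2 = 1)
        = (if x then !(decide (a % 2 = 1)) else decide (a % 2 = 1)) := by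
      cases x with
      | false => simp
      | true =>
        by_cases h : a % 2 = 1 <;> simp [h] <;> omega
    rw [hstep]

-- ===== VERDICT (by name: the statement is the Claim_ definition above) =====
theorem code_differential_spec : Claim_equal_code_differential := by
  intro decoding inpt _ hpre
  unfold Spec_code_differential
  obtain ⟨h, t, rfl⟩ : ∃ h t, inpt = h :: t := by
    cases inpt with
    | nil => exact absurd rfl hpre
    | cons h t => exact ⟨h, t, rfl⟩
  cases decoding with
  | false =>
    unfold code_differential code_differential_alt
    simp only [Bool.false_eq_true, if_false, Prod.mk.injEq, and_true]
    rw [PySem.List.len_eq, PySem.List.pyGetD_zero_cons]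
    have hA : (((h :: t).length : Int)) = ((t.length : Int) + 1) := by simp
    rw [hA]
    have hleft := enc_loop h t t.length le_rfl
    rw [List.take_length] at hleft
    rw [hleft, counts_fold, List.nil_append, List.scanl_cons, List.tail_cons,
        parity_scanl]
    have hseed : decide ((0 + (if h then 1 else 0) : Int) % 2 = 1) = h := by
      cases h <;> simp
    rw [hseed]
  | true =>
    unfold code_differential code_differential_alt
    simp only [if_true, Prod.mk.injEq, and_true]
    rw [PySem.List.len_eq, PySem.List.pyGetD_zero_cons]
    have hbody : (fun (output : List Bool) (i : Int) =>
          if PySem.List.pyGetD (h :: t) i false ≠ PySem.List.pyGetD (h :: t) (i - 1) false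
          then output ++ [true] else output ++ [false])
        = (fun output i => output ++
            [decide (PySem.List.pyGetD (h :: t) i false ≠ PySem.List.pyGetD (h :: t) (i - 1) false)]) := by
      funext o i; split_ifs with hc <;> simp [hc]
    rw [hbody, PySem.List.foldl_append_singleton_eq_map]
    have hpos : (0 : Int) < (((h :: t).length : Int)) := by
      simp
    rw [PySem.List.pyRange_one_cons hpos, List.map_cons, List.singleton_append]
    simp only [zero_add]
    congr 1
    apply List.map_congr_left
    intro i hi
    have hi1 : 1 ≤ i := (PySem.List.mem_pyRange_one.mp hi).1
    rw [if_neg (by omega : ¬ i = 0)]
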